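-- pv_equiv track=rewrite | github.com/gudwh14/algorithm | programmers/2022 kakao blind/신고 결과 받기.py | solution
-- ===== SOURCE A (Python) =====
-- import collections
--
-- def solution(id_list, report, k):
--     reports = collections.defaultdict(set)
--     counts = collections.defaultdict(int)
--     answer = [0 for _ in range(len(id_list))]
--
--     for rep in report:
--         users = rep.split(' ')
--         if users[1] not in reports[users[0]]:
--             counts[users[1]] += 1
--         reports[users[0]].add(users[1])
--
--     for i in range(len(id_list)):
--         for report_user in reports[id_list[i]]:
--             if counts[report_user] >= k:
--                 answer[i] += 1
--     return answer
-- ===== SOURCE B (Python) =====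
-- def solution(id_list, report, k):
--     pairs = {(r.split(' ')[0], r.split(' ')[1]) for r in report}
--     targets = {v for _, v in pairs}
--     banned = {v for v in targets if sum(1 for p in pairs if p[1] == v) >= k}
--     return [sum(1 for b in banned if (uid, b) in pairs) for uid in id_list]
-- ===== Notes on version B (the rewrite author's own statement) =====
-- stated objective: alternative
-- what changed: A groups reports into a per-reporter dict of sets plus an incrementally maintained count dict and scans each id's reported-set; B keeps no dicts at all: it builds one deduped set of (reporter,reported) pairs, derives the set of banned targets by rescanning the pairs per target, and answers each id by counting banned targets b with (id,b) in the pair set.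
import Mathlib
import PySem

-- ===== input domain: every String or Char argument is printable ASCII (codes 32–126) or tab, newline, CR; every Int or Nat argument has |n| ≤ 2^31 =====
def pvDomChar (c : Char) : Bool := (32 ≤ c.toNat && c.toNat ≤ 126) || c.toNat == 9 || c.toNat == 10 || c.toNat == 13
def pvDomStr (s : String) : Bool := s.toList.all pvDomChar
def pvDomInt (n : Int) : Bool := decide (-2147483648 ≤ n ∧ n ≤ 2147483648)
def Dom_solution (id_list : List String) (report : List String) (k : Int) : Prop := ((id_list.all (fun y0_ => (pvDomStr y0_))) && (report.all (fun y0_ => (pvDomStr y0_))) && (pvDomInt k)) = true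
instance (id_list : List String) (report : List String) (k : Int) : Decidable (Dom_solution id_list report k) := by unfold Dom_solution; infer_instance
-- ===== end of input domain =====

-- B keeps no dicts: one deduped set of (reporter,reported) pairs, a banned-target set
-- obtained by rescanning the pairs, and per-id counting of banned pair memberships
-- (objective: alternative decomposition, not faster).

-- ===== PORT A =====
-- body of A's first for-loop: state = (reports, counts)
def stepA (st : PySem.Dict String (PySem.Set String) × PySem.Dict String Int) (rep : String) :
    PySem.Dict String (PySem.Set String) × PySem.Dict String Int :=
  let users := (PySem.Str.split? rep " ").getD []   -- rep.split(' '); sep ≠ '' so never none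
  let u := (PySem.List.pyGet? users 0).getD ""      -- users[0] (Pre_ guarantees it exists)
  let v := (PySem.List.pyGet? users 1).getD ""      -- users[1] (Pre_ guarantees it exists)
  let rs := st.1.getD u PySem.Set.empty             -- reports[users[0]] (defaultdict(set))
  let counts := if v ∈ rs then st.2 else st.2.modify v 0 (· + 1)  -- counts[users[1]] += 1
  (st.1.insert u (PySem.Set.add rs v), counts)      -- reports[users[0]].add(users[1])

def solution (id_list : List String) (report : List String) (k : Int) : List Int :=
  let st := report.foldl stepA (PySem.Dict.empty, PySem.Dict.empty)
  -- second loop: answer[i] counts reports[id_list[i]] members with counts[·] ≥ k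
  -- (iterating a Python set: the result is a count, independent of iteration order)
  id_list.map (fun uid =>
    (st.1.getD uid PySem.Set.empty).foldl
      (fun a v => if st.2.getD v 0 ≥ k then a + 1 else a) (0 : Int))

-- ===== PORT B =====
def solution_alt (id_list : List String) (report : List String) (k : Int) : List Int :=
  -- pairs = {(r.split(' ')[0], r.split(' ')[1]) for r in report}
  let pairs : PySem.Set (String × String) :=
    PySem.Set.ofList (report.map (fun r =>
      ((PySem.List.pyGet? ((PySem.Str.split? r " ").getD []) 0).getD "",
       (PySem.List.pyGet? ((PySem.Str.split? r " ").getD []) 1).getD "")))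
  -- targets = {v for _, v in pairs}
  let targets : PySem.Set String := PySem.Set.ofList (pairs.map (·.2))
  -- banned = {v for v in targets if sum(1 for p in pairs if p[1] == v) >= k}
  let banned : PySem.Set String := targets.filter (fun v =>
    pairs.foldl (fun a p => if p.2 == v then a + 1 else a) (0 : Int) ≥ k)
  -- [sum(1 for b in banned if (uid, b) in pairs) for uid in id_list]
  id_list.map (fun uid =>
    banned.foldl (fun a b => if (uid, b) ∈ pairs then a + 1 else a) (0 : Int))

-- ===== PRECONDITION & SPEC =====
-- Pre_ excludes exactly the reports without a space: there users[1] raises IndexError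
-- in A (and B's split(' ')[1] raises IndexError too).
def Pre_solution (id_list : List String) (report : List String) (k : Int) : Prop :=
  ∀ rep ∈ report, 2 ≤ ((PySem.Str.split? rep " ").getD []).length
instance (id_list : List String) (report : List String) (k : Int) : Decidable (Pre_solution id_list report k) := by unfold Pre_solution; infer_instance

def pvWitness_solution : List String × List String × Int := (["muzi", "frodo"], ["muzi frodo", "frodo muzi", "muzi frodo"], 2)

def Spec_solution (id_list : List String) (report : List String) (k : Int) (out : List Int) : Prop := out = solution_alt id_list report k
instance (id_list : List String) (report : List String) (k : Int) (out : List Int) : Decidable (Spec_solution id_list report k out) := by unfold Spec_solution; infer_instance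

-- ===== CLAIM (what is proved, stated in full; the proofs are below) =====
def Claim_equal_solution : Prop := ∀ (id_list : List String) (report : List String) (k : Int), Dom_solution id_list report k → Pre_solution id_list report k → Spec_solution id_list report k (solution id_list report k)

-- ===== LEMMAS AND PROOFS =====

-- the (reporter, reported) pair a report string denotes
def pairOf (rep : String) : String × String :=
  (((PySem.List.pyGet? ((PySem.Str.split? rep " ").getD []) 0).getD ""),
   ((PySem.List.pyGet? ((PySem.Str.split? rep " ").getD []) 1).getD ""))

lemma stepA_eq (st : PySem.Dict String (PySem.Set String) × PySem.Dict String Int) (rep : String) :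
    stepA st rep =
      (st.1.insert (pairOf rep).1
        (PySem.Set.add (st.1.getD (pairOf rep).1 PySem.Set.empty) (pairOf rep).2),
       if (pairOf rep).2 ∈ st.1.getD (pairOf rep).1 PySem.Set.empty then st.2
       else st.2.modify (pairOf rep).2 0 (· + 1)) := rfl

-- invariant for A's first loop: Q' is the deduped list of pairs seen so far
lemma foldA_inv (L : List String) :
    ∀ (R : PySem.Dict String (PySem.Set String)) (C : PySem.Dict String Int)
      (Q : List (String × String)),
    Q.Nodup →
    (∀ u : String, (R.getD u PySem.Set.empty).Nodup) →
    (∀ u v : String, v ∈ R.getD u PySem.Set.empty ↔ (u, v) ∈ Q) →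
    (∀ v : String, C.getD v 0 = ((Q.filter (fun p => p.2 == v)).length : Int)) →
    ∃ Q' : List (String × String),
      Q'.Nodup ∧
      (∀ p, p ∈ Q' ↔ p ∈ Q ∨ p ∈ L.map pairOf) ∧
      (∀ u : String, ((L.foldl stepA (R, C)).1.getD u PySem.Set.empty).Nodup) ∧
      (∀ u v, v ∈ (L.foldl stepA (R, C)).1.getD u PySem.Set.empty ↔ (u, v) ∈ Q') ∧
      (∀ v, (L.foldl stepA (R, C)).2.getD v 0 = ((Q'.filter (fun p => p.2 == v)).length : Int)) := by
  induction L with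
  | nil =>
    intro R C Q hQ hS h1 h2
    exact ⟨Q, hQ, by simp, hS, h1, h2⟩
  | cons rep L ih =>
    intro R C Q hQ hS h1 h2
    rw [List.foldl_cons, stepA_eq]
    set u := (pairOf rep).1 with hu
    set v := (pairOf rep).2 with hv
    have hpr : pairOf rep = (u, v) := rfl
    by_cases hmem : v ∈ R.getD u PySem.Set.empty
    · -- pair already seen: counts unchanged, set add is a no-op value-wise
      have hQmem : (u, v) ∈ Q := (h1 u v).mp hmem
      have hset : PySem.Set.add (R.getD u PySem.Set.empty) v = R.getD u PySem.Set.empty :=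
        PySem.Set.add_of_mem hmem
      rw [if_pos hmem, hset]
      have hS2 : ∀ u' : String,
          ((R.insert u (R.getD u PySem.Set.empty)).getD u' PySem.Set.empty).Nodup := by
        intro u'
        rw [PySem.Dict.getD_insert]
        split_ifs with h
        · exact hS u
        · exact hS u'
      have h12 : ∀ u' v' : String,
          v' ∈ (R.insert u (R.getD u PySem.Set.empty)).getD u' PySem.Set.empty ↔ (u', v') ∈ Q := by
        intro u' v'
        rw [PySem.Dict.getD_insert]
        split_ifs with h
        · subst h; exact h1 _ _
        · exact h1 u' v'
      obtain ⟨Q', hQ', hmem', hS', h1', h2'⟩ :=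
        ih (R.insert u (R.getD u PySem.Set.empty)) C Q hQ hS2 h12 h2
      refine ⟨Q', hQ', ?_, hS', h1', h2'⟩
      intro p
      rw [hmem' p]
      simp only [List.map_cons, List.mem_cons, hpr]
      have hsub : p = (u, v) → p ∈ Q := fun h => h ▸ hQmem
      tauto
    · -- new pair: counts[v] += 1 and Q grows by (u, v)
      have hQmem : (u, v) ∉ Q := fun h => hmem ((h1 u v).mpr h)
      rw [if_neg hmem]
      have hQ0 : (Q ++ [(u, v)]).Nodup := by
        simp only [List.nodup_append, List.nodup_singleton, true_and]
        refine ⟨hQ, ?_⟩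
        intro p hp q hq
        rw [List.mem_singleton] at hq
        subst hq
        exact fun h => hQmem (h ▸ hp)
      have hS2 : ∀ u' : String,
          ((R.insert u (PySem.Set.add (R.getD u PySem.Set.empty) v)).getD u' PySem.Set.empty).Nodup := by
        intro u'
        rw [PySem.Dict.getD_insert]
        split_ifs with h
        · exact PySem.Set.nodup_add _ _ (hS u)
        · exact hS u'
      have h12 : ∀ u' v' : String,
          v' ∈ (R.insert u (PySem.Set.add (R.getD u PySem.Set.empty) v)).getD u' PySem.Set.empty
            ↔ (u', v') ∈ Q ++ [(u, v)] := by
        intro u' v'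
        rw [PySem.Dict.getD_insert]
        split_ifs with h
        · subst h
          rw [PySem.Set.mem_add, h1 u v']
          simp
        · rw [h1 u' v']
          simp only [List.mem_append, List.mem_singleton]
          constructor
          · exact Or.inl
          · rintro (hh | hh)
            · exact hh
            · exact absurd (congrArg Prod.fst hh) h
      have h22 : ∀ v' : String, (C.modify v 0 (· + 1)).getD v' 0
          = (((Q ++ [(u, v)]).filter (fun p => p.2 == v')).length : Int) := by
        intro v'
        rw [PySem.Dict.getD_modify, List.filter_append]
        split_ifs with h
        · subst h
          rw [List.length_append, h2 v]
          simp
        · have he : ([(u, v)].filter (fun p => p.2 == v')) = [] := by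
            simp [Ne.symm h]
          rw [he, List.append_nil, h2 v']
      obtain ⟨Q', hQ', hmem', hS', h1', h2'⟩ :=
        ih (R.insert u (PySem.Set.add (R.getD u PySem.Set.empty) v))
           (C.modify v 0 (· + 1)) (Q ++ [(u, v)]) hQ0 hS2 h12 h22
      refine ⟨Q', hQ', ?_, hS', h1', h2'⟩
      intro p
      rw [hmem' p]
      simp only [List.mem_append, List.map_cons, List.mem_cons, hpr]
      tauto

theorem solution_spec_aux (id_list : List String) (report : List String) (k : Int) :
    solution id_list report k = solution_alt id_list report k := by
  unfold solution solution_alt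
  dsimp only
  set pairs := PySem.Set.ofList (report.map (fun r =>
      ((PySem.List.pyGet? ((PySem.Str.split? r " ").getD []) 0).getD "",
       (PySem.List.pyGet? ((PySem.Str.split? r " ").getD []) 1).getD ""))) with hpairsdef
  have hpairs : pairs = PySem.Set.ofList (report.map pairOf) := rfl
  have hPnd : pairs.Nodup := by rw [hpairs]; exact PySem.Set.nodup_ofList _
  have hPmem : ∀ p, p ∈ pairs ↔ p ∈ report.map pairOf := by
    intro p; rw [hpairs]; simp [PySem.Set.mem_ofList]
  -- A's loop invariant, instantiated from the empty state
  obtain ⟨Q', hQnd, hQmem, hSnd, h1, h2⟩ := foldA_inv report PySem.Dict.empty PySem.Dict.empty []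
    (List.nodup_nil)
    (by intro u; simp [PySem.Dict.getD_empty, PySem.Set.empty])
    (by intro u v; simp [PySem.Dict.getD_empty, PySem.Set.empty])
    (by intro v; simp [PySem.Dict.getD_empty])
  have hQmem' : ∀ p, p ∈ Q' ↔ p ∈ pairs := by
    intro p; rw [hQmem p, hPmem p]; simp
  have hperm : Q'.Perm pairs := (List.perm_ext_iff_of_nodup hQnd hPnd).mpr hQmem'
  -- A's counts dict agrees with B's per-target rescan of the deduped pairs
  have hcount : ∀ v, (report.foldl stepA (PySem.Dict.empty, PySem.Dict.empty)).2.getD v 0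
      = ((pairs.filter (fun p => p.2 == v)).length : Int) := by
    intro v
    rw [h2 v]
    exact_mod_cast (hperm.filter _).length_eq
  apply List.map_congr_left
  intro uid _
  -- A's per-id value: countP over its (nodup) set of reported users
  rw [PySem.List.foldl_ite_add_one (fun v =>
      (report.foldl stepA (PySem.Dict.empty, PySem.Dict.empty)).2.getD v 0 ≥ k)]
  -- B's inner sums: countP over pairs / over banned
  rw [PySem.List.foldl_ite_add_one (fun b => (uid, b) ∈ pairs)]
  simp only [zero_add]
  norm_cast
  rw [List.countP_eq_length_filter, List.countP_eq_length_filter]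
  set S := (report.foldl stepA (PySem.Dict.empty, PySem.Dict.empty)).1.getD uid PySem.Set.empty
  set g := fun v : String => decide ((report.foldl stepA (PySem.Dict.empty, PySem.Dict.empty)).2.getD v 0 ≥ k)
  set banned := (PySem.Set.ofList (pairs.map (·.2))).filter (fun v =>
      pairs.foldl (fun a p => if p.2 == v then a + 1 else a) (0 : Int) ≥ k) with hbanned
  -- both sides are lengths of nodup lists with the same members
  have hbc : ∀ v : String, pairs.foldl (fun a p => if p.2 == v then a + 1 else a) (0 : Int)
      = ((pairs.filter (fun p => p.2 == v)).length : Int) := by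
    intro v
    rw [PySem.List.foldl_if_add_one (fun p : String × String => p.2 == v)]
    rw [List.countP_eq_length_filter]
    simp
  have hBnd : (banned.filter (fun b => decide ((uid, b) ∈ pairs))).Nodup :=
    ((PySem.Set.nodup_ofList _).filter _).filter _
  have hmemiff : ∀ v, v ∈ S.filter g ↔ v ∈ banned.filter (fun b => decide ((uid, b) ∈ pairs)) := by
    intro v
    rw [List.mem_filter, List.mem_filter, hbanned, List.mem_filter]
    constructor
    · rintro ⟨hvS, hvg⟩
      have hpair : (uid, v) ∈ pairs := (hQmem' _).mp ((h1 uid v).mp hvS)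
      have hvt : v ∈ PySem.Set.ofList (pairs.map (·.2)) := by
        rw [PySem.Set.mem_ofList, List.mem_map]
        exact ⟨(uid, v), hpair, rfl⟩
      have hk := of_decide_eq_true hvg
      rw [hcount v] at hk
      refine ⟨⟨hvt, ?_⟩, by simpa using hpair⟩
      rw [decide_eq_true_eq, hbc v]
      exact hk
    · rintro ⟨⟨hvt, hvk⟩, hvp⟩
      have hpair : (uid, v) ∈ pairs := of_decide_eq_true hvp
      refine ⟨(h1 uid v).mpr ((hQmem' _).mpr hpair), ?_⟩
      rw [decide_eq_true_eq, hcount v]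
      have := of_decide_eq_true hvk
      rwa [hbc v] at this
  exact ((List.perm_ext_iff_of_nodup ((hSnd uid).filter _) hBnd).mpr hmemiff).length_eq

-- ===== VERDICT (by name: the statement is the Claim_ definition above) =====
theorem solution_spec : Claim_equal_solution := by
  intro id_list report k _ _
  unfold Spec_solution
  exact solution_spec_aux id_list report k
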